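-- pv_equiv track=rewrite | github.com/Qiao-Liang/LeetCode | LC1121.py | canDivideIntoSubsequences
-- ===== SOURCE A (Python) =====
-- from collections import Counter
--
-- def canDivideIntoSubsequences(nums, K):
--     """
--     :type nums: List[int]
--     :type K: int
--     :rtype: bool
--     """
--     count = Counter(nums)
--     groups = [[] for _ in range(max(count.values()))]
--     gi = 0
--     len_g = len(groups)
--
--     for n in nums:
--         groups[gi].append(n)
--         gi = (gi + 1) % len_g
--
--     return min([len(group) for group in groups]) >= K
-- ===== SOURCE B (Python) =====
-- from collections import Counter
--
-- def canDivideIntoSubsequences(nums, K):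
--     m = max(Counter(nums).values())
--     return len(nums) // m >= K
-- ===== Notes on version B (the rewrite author's own statement) =====
-- stated objective: simpler
-- what changed: B drops the group list, the round-robin distribution loop and the min scan, returning the closed form len(nums) // max_multiplicity >= K, since round-robin into m groups always gives minimum group size floor(n/m).
import Mathlib
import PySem

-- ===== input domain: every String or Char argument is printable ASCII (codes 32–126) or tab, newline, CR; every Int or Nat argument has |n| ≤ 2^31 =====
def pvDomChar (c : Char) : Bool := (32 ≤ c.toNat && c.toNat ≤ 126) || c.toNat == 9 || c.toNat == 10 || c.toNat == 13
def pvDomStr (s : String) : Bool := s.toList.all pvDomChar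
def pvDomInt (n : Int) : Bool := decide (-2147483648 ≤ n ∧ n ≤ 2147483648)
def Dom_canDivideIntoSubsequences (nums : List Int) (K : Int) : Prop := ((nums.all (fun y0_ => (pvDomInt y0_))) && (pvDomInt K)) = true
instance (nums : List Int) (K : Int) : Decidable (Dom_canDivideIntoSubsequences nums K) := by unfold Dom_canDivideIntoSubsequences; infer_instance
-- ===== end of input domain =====

-- B replaces the group list, round-robin loop and min scan with the closed form len(nums) // max_multiplicity >= K (simpler, same behaviour).


-- ===== PORT A =====
-- count = Counter(nums); groups = [[] for _ in range(max(count.values()))]; round-robin append; min of group lengths >= K.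
-- gi is kept as a Nat: in Python it is always a nonnegative int < len_g (its mod is by the positive len_g).
-- max() on an empty values list raises ValueError in Python: the `none` branch is unreachable under Pre_.
def canDivideIntoSubsequences (nums : List Int) (K : Int) : Bool :=
  let count := PySem.Dict.counter nums
  match PySem.List.max? count.values (fun y => y) with
  | none => false
  | some mx =>
    let groups : List (List Int) := List.replicate mx.toNat ([] : List Int)
    let len_g := groups.length
    let st := nums.foldl
      (fun (st : List (List Int) × Nat) n =>
        (st.1.modify st.2 (fun g => g ++ [n]), (st.2 + 1) % len_g))
      (groups, 0)
    match PySem.List.min? (st.1.map (fun g => (g.length : Int))) (fun y => y) with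
    | none => false
    | some mn => decide (mn ≥ K)

-- ===== PORT B =====
-- m = max(Counter(nums).values()); return len(nums) // m >= K  (same ValueError on empty nums: `none` branch unreachable under Pre_).
def canDivideIntoSubsequences_alt (nums : List Int) (K : Int) : Bool :=
  match PySem.List.max? (PySem.Dict.counter nums).values (fun y => y) with
  | none => false
  | some m => decide (PySem.Int.floordiv (nums.length : Int) m ≥ K)

-- ===== PRECONDITION & SPEC =====
-- Pre_ excludes only the empty list, on which BOTH Pythons raise ValueError (max() of an empty sequence).
def Pre_canDivideIntoSubsequences (nums : List Int) (K : Int) : Prop := nums ≠ []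
instance (nums : List Int) (K : Int) : Decidable (Pre_canDivideIntoSubsequences nums K) := by unfold Pre_canDivideIntoSubsequences; infer_instance
def pvWitness_canDivideIntoSubsequences : List Int × Int := ([1, 2, 2, 3], 2)

def Spec_canDivideIntoSubsequences (nums : List Int) (K : Int) (out : Bool) : Prop := out = canDivideIntoSubsequences_alt nums K
instance (nums : List Int) (K : Int) (out : Bool) : Decidable (Spec_canDivideIntoSubsequences nums K out) := by unfold Spec_canDivideIntoSubsequences; infer_instance

-- ===== CLAIM (what is proved, stated in full; the proofs are below) =====
def Claim_equal_canDivideIntoSubsequences : Prop := ∀ (nums : List Int) (K : Int), Dom_canDivideIntoSubsequences nums K → Pre_canDivideIntoSubsequences nums K → Spec_canDivideIntoSubsequences nums K (canDivideIntoSubsequences nums K)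

-- ===== LEMMAS AND PROOFS =====

-- lengths of the groups commute with List.modify by append
theorem pv_map_length_modify (l : List (List Int)) (i : Nat) (n : Int) :
    ((l.modify i (fun g => g ++ [n])).map (List.length)) = (l.map List.length).modify i (· + 1) := by
  induction l generalizing i with
  | nil => simp
  | cons h t ih =>
    cases i with
    | zero => simp [List.modify_zero_cons]
    | succ j => simp [List.modify_succ_cons, ih]

-- modifying exactly at the end of a prefix
theorem pv_modify_append {α : Type} (p : List α) (x : α) (s : List α) (f : α → α) :
    (p ++ x :: s).modify p.length f = p ++ f x :: s := by
  induction p with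
  | nil => simp [List.modify_zero_cons]
  | cons h t ih => simp [List.modify_succ_cons, ih]

-- the round-robin invariant: lengths stay of shape  replicate gi (q+1) ++ replicate (m-gi) q
theorem pv_roundrobin (m : Nat) (hm : 0 < m) (l : List Int) :
    ∀ (gs : List (List Int)) (gi q : Nat), gi < m →
      gs.map List.length = List.replicate gi (q+1) ++ List.replicate (m - gi) q →
      ∃ gi' q', gi' < m ∧
        (l.foldl (fun (st : List (List Int) × Nat) n =>
            (st.1.modify st.2 (fun g => g ++ [n]), (st.2 + 1) % m)) (gs, gi)).1.map List.length
          = List.replicate gi' (q'+1) ++ List.replicate (m - gi') q' ∧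
        m * q' + gi' = m * q + gi + l.length := by
  induction l with
  | nil =>
    intro gs gi q hgi hshape
    exact ⟨gi, q, hgi, by simpa using hshape, by simp⟩
  | cons n rest ih =>
    intro gs gi q hgi hshape
    have hlen : (gs.modify gi (fun g => g ++ [n])).map List.length
        = (gs.map List.length).modify gi (· + 1) := pv_map_length_modify gs gi n
    rw [hshape] at hlen
    have hmod : (List.replicate gi (q+1) ++ List.replicate (m - gi) q).modify gi (· + 1)
        = List.replicate (gi+1) (q+1) ++ List.replicate (m - (gi+1)) q := by
      have hsub : m - gi = (m - gi - 1) + 1 := by omega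
      have h1 := pv_modify_append (List.replicate gi (q+1)) q (List.replicate (m - gi - 1) q) (· + 1)
      rw [List.length_replicate] at h1
      have h2 : m - (gi+1) = m - gi - 1 := by omega
      rw [hsub, List.replicate_succ, h1, h2, List.replicate_succ' (n := gi)]
      simp
    rw [hmod] at hlen
    rw [List.foldl_cons]
    by_cases hcase : gi + 1 = m
    · rw [hcase, Nat.mod_self]
      obtain ⟨gi', q', h1, h2, h3⟩ := ih (gs.modify gi (fun g => g ++ [n])) 0 (q+1) hm
        (by rw [hlen, hcase]; simp)
      refine ⟨gi', q', h1, h2, ?_⟩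
      simp only [Nat.mul_succ, List.length_cons] at h3 ⊢
      omega
    · rw [Nat.mod_eq_of_lt (by omega : gi + 1 < m)]
      obtain ⟨gi', q', h1, h2, h3⟩ := ih (gs.modify gi (fun g => g ++ [n])) (gi+1) q (by omega) hlen
      refine ⟨gi', q', h1, h2, ?_⟩
      simp only [List.length_cons] at h3 ⊢
      omega

-- Python's min of a shape list (gi copies of q+1, then m-gi copies of q, gi < m) is q
theorem pv_min_shape (gi q m : Nat) (hgi : gi < m) :
    PySem.List.min?
      ((List.replicate gi (q+1) ++ List.replicate (m - gi) q).map (fun x : Nat => (x : Int)))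
      (fun y => y) = some (q : Int) := by
  have hmemq : (q : Int) ∈ (List.replicate gi (q+1) ++ List.replicate (m - gi) q).map (fun x : Nat => (x : Int)) :=
    List.mem_map.2 ⟨q, List.mem_append.2 (Or.inr (List.mem_replicate.2 ⟨by omega, rfl⟩)), rfl⟩
  have hne : (List.replicate gi (q+1) ++ List.replicate (m - gi) q).map (fun x : Nat => (x : Int)) ≠ [] := by
    intro h; rw [h] at hmemq; simp at hmemq
  obtain ⟨mn, hmn⟩ : ∃ mn, PySem.List.min?
      ((List.replicate gi (q+1) ++ List.replicate (m - gi) q).map (fun x : Nat => (x : Int)))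
      (fun y => y) = some mn := by
    cases h : PySem.List.min?
        ((List.replicate gi (q+1) ++ List.replicate (m - gi) q).map (fun x : Nat => (x : Int)))
        (fun y => y) with
    | none => exact absurd ((PySem.List.min?_eq_none_iff _ _).1 h) hne
    | some v => exact ⟨v, rfl⟩
  have hle : mn ≤ (q : Int) := PySem.List.min?_isMin hmn _ hmemq
  have hge : (q : Int) ≤ mn := by
    obtain ⟨x, hx, rfl⟩ := List.mem_map.1 (PySem.List.min?_mem hmn)
    rcases List.mem_append.1 hx with h | h
    · have := (List.mem_replicate.1 h).2; subst this; push_cast; omega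
    · have := (List.mem_replicate.1 h).2; subst this; push_cast; omega
  rw [hmn]
  congr 1
  omega

-- every value of Counter(nums) is a positive count
theorem pv_counter_value_pos (nums : List Int) (m : Int)
    (hmem : m ∈ (PySem.Dict.counter nums).values) : 1 ≤ m := by
  have hv : (PySem.Dict.counter nums).values
      = ((PySem.Dict.counter nums).items).map (·.2) := rfl
  rw [hv, PySem.Dict.items_counter] at hmem
  simp only [List.map_map, List.mem_map, Function.comp] at hmem
  obtain ⟨k, hk, rfl⟩ := hmem
  have hknums : k ∈ nums := (PySem.Set.mem_ofList nums k).1 hk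
  have : 1 ≤ nums.count k := List.count_pos_iff.2 hknums
  exact_mod_cast this

-- on a nonempty list, max(Counter(nums).values()) returns a value
theorem pv_max_some (nums : List Int) (hpre : nums ≠ []) :
    ∃ mx, PySem.List.max? (PySem.Dict.counter nums).values (fun y => y) = some mx := by
  cases h : PySem.List.max? (PySem.Dict.counter nums).values (fun y => y) with
  | none =>
    exfalso
    have hvals : (PySem.Dict.counter nums).values = [] := (PySem.List.max?_eq_none_iff _ _).1 h
    obtain ⟨x, xs, rfl⟩ := List.exists_cons_of_ne_nil hpre
    have hx : x ∈ PySem.Set.ofList (x :: xs) := (PySem.Set.mem_ofList _ _).2 (by simp)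
    have hitem : (x, (((x :: xs).count x : Int))) ∈ (PySem.Dict.counter (x :: xs)).items := by
      rw [PySem.Dict.items_counter]
      exact List.mem_map.2 ⟨x, hx, rfl⟩
    have hvmem : (((x :: xs).count x : Int)) ∈ (PySem.Dict.counter (x :: xs)).values := by
      have hv : (PySem.Dict.counter (x :: xs)).values
          = ((PySem.Dict.counter (x :: xs)).items).map (·.2) := rfl
      rw [hv]
      exact List.mem_map.2 ⟨_, hitem, rfl⟩
    rw [hvals] at hvmem
    simp at hvmem
  | some v => exact ⟨v, rfl⟩

-- ===== VERDICT (by name: the statement is the Claim_ definition above) =====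
theorem canDivideIntoSubsequences_spec : Claim_equal_canDivideIntoSubsequences := by
  intro nums K _ hpre
  unfold Spec_canDivideIntoSubsequences canDivideIntoSubsequences canDivideIntoSubsequences_alt
  obtain ⟨mx, hmx⟩ := pv_max_some nums hpre
  simp only [hmx, List.length_replicate]
  have hpos : 1 ≤ mx := pv_counter_value_pos nums mx (PySem.List.max?_mem hmx)
  have hmnat : 0 < mx.toNat := by omega
  have hcast : ((mx.toNat : Nat) : Int) = mx := by omega
  obtain ⟨gi', q', hgi', hshape, htot⟩ :=
    pv_roundrobin mx.toNat hmnat nums (List.replicate mx.toNat ([] : List Int)) 0 0 hmnat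
      (by simp)
  have hshape2 : (List.map (fun g : List Int => (g.length : Int))
        (nums.foldl (fun (st : List (List Int) × Nat) n =>
          (st.1.modify st.2 (fun g => g ++ [n]), (st.2 + 1) % mx.toNat))
          (List.replicate mx.toNat ([] : List Int), 0)).1)
      = (List.replicate gi' (q'+1) ++ List.replicate (mx.toNat - gi') q').map (fun x : Nat => (x : Int)) := by
    rw [← hshape, List.map_map]
    rfl
  rw [hshape2, pv_min_shape gi' q' mx.toNat hgi']
  have hq : q' = nums.length / mx.toNat := by
    have hdiv : (mx.toNat * q' + gi') / mx.toNat = q' + gi' / mx.toNat := Nat.mul_add_div hmnat q' gi'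
    rw [htot] at hdiv
    simp only [Nat.mul_zero, Nat.zero_add] at hdiv
    rw [hdiv, Nat.div_eq_of_lt hgi']
    omega
  have hfd : PySem.Int.floordiv (nums.length : Int) mx = ((nums.length / mx.toNat : Nat) : Int) := by
    rw [← hcast]
    exact PySem.Int.floordiv_natCast nums.length mx.toNat
  rw [hfd, hq]
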